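-- pv_equiv track=rewrite | github.com/aidangollan/MSU-CSE231 | CSE231/proj8/proj08.py | find_max_friends
-- ===== SOURCE A (Python) =====
-- def find_max_friends(names_lst, friends_lst): #finds the person with the most friends
--     friends_lst_new = [] #initializes lists
--     max_list = []
--     for i in friends_lst: #for each list of friends in friends list
--         friends_lst_new.append(len(i)) #turn list into it's len
--     for i in enumerate(friends_lst_new): #for each number in new list
--         if i[1] == max(friends_lst_new): #if that number is the same as the max
--             max_list.append(names_lst[i[0]]) #add the corrisponding name to list
--     max_list.sort() #sort list
--     return((max_list, max(friends_lst_new))) #makes tuple of max list and what that max is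
-- ===== SOURCE B (Python) =====
-- def find_max_friends(names_lst, friends_lst):
--     # single pass keeping the best count seen so far and the names that achieve it
--     best_count = len(friends_lst[0])
--     best_names = [names_lst[0]]
--     for i in range(1, len(friends_lst)):
--         count = len(friends_lst[i])
--         if count > best_count:
--             best_count = count
--             best_names = [names_lst[i]]
--         elif count == best_count:
--             best_names.append(names_lst[i])
--     best_names.sort()
--     return (best_names, best_count)
-- ===== Notes on version B (the rewrite author's own statement) =====
-- stated objective: alternative
-- what changed: B replaces A's two passes (build a length list, then filter it against a recomputed max()) by one running-maximum pass seeded from index 0 that resets the candidate-name list on a strictly larger count and appends on a tie; Pre_ excludes exactly the inputs where A raises (empty friends_lst: ValueError; a maximal-length friends list whose index has no corresponding name: IndexError), where B raises too.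
import Mathlib
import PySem

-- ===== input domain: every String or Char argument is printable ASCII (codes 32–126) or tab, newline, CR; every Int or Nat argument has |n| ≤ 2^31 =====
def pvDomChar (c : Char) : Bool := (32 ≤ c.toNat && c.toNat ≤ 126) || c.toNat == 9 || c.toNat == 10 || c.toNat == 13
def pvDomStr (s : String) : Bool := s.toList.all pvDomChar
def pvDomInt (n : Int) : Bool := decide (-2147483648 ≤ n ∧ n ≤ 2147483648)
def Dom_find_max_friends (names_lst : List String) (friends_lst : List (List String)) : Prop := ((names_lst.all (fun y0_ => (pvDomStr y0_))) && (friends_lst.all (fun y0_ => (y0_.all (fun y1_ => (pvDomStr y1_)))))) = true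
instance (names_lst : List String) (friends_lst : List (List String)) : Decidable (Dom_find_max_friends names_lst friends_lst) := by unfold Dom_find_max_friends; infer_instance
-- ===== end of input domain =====

-- B replaces A's filter-against-repeated-max() double pass by one running-maximum pass; equivalence of the return values is proved on Pre_.

-- ===== PORT A =====
def find_max_friends (names_lst : List String) (friends_lst : List (List String)) : List String × Int :=
  let friends_lst_new : List Int :=
    friends_lst.foldl (fun acc i => acc ++ [(i.length : Int)]) []
  let max_list : List String :=
    (PySem.List.enumerate friends_lst_new).foldl (fun acc i =>
      if i.2 = (PySem.List.max? friends_lst_new (fun x => x)).getD 0 then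
        acc ++ [PySem.List.pyGetD names_lst i.1 ""]
      else acc) []
  (PySem.List.sorted max_list (fun x => x) false,
   (PySem.List.max? friends_lst_new (fun x => x)).getD 0)

-- ===== PORT B =====
-- one step of B's loop (state: best count so far, names achieving it)
def fmfAltStep (names_lst : List String) (friends_lst : List (List String))
    (st : Int × List String) (i : Int) : Int × List String :=
  let count : Int := ((PySem.List.pyGetD friends_lst i []).length : Int)
  if count > st.1 then (count, [PySem.List.pyGetD names_lst i ""])
  else if count = st.1 then (st.1, st.2 ++ [PySem.List.pyGetD names_lst i ""])
  else st

def find_max_friends_alt (names_lst : List String) (friends_lst : List (List String)) : List String × Int :=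
  let st := (PySem.List.pyRange 1 (friends_lst.length : Int) 1).foldl
      (fmfAltStep names_lst friends_lst)
      (((PySem.List.pyGetD friends_lst 0 []).length : Int), [PySem.List.pyGetD names_lst 0 ""])
  (PySem.List.sorted st.2 (fun x => x) false, st.1)

-- ===== PRECONDITION & SPEC =====
-- Pre_ excludes exactly the inputs where A raises: empty friends_lst (ValueError from max)
-- and inputs where some friends list of maximal length sits at an index with no corresponding name (IndexError);
-- B raises on exactly the same inputs (IndexError on both).
def Pre_find_max_friends (names_lst : List String) (friends_lst : List (List String)) : Prop :=
  friends_lst ≠ [] ∧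
  ∀ i < friends_lst.length,
    ((∀ j < friends_lst.length, (friends_lst.getD j []).length ≤ (friends_lst.getD i []).length) →
      i < names_lst.length)
instance (names_lst : List String) (friends_lst : List (List String)) : Decidable (Pre_find_max_friends names_lst friends_lst) := by unfold Pre_find_max_friends; infer_instance

def pvWitness_find_max_friends : List String × List (List String) :=
  (["b", "a"], [["x"], ["y", "z"]])

def Spec_find_max_friends (names_lst : List String) (friends_lst : List (List String)) (out : List String × Int) : Prop := out = find_max_friends_alt names_lst friends_lst
instance (names_lst : List String) (friends_lst : List (List String)) (out : List String × Int) : Decidable (Spec_find_max_friends names_lst friends_lst out) := by unfold Spec_find_max_friends; infer_instance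

-- ===== CLAIM (what is proved, stated in full; the proofs are below) =====
def Claim_equal_find_max_friends : Prop := ∀ (names_lst : List String) (friends_lst : List (List String)), Dom_find_max_friends names_lst friends_lst → Pre_find_max_friends names_lst friends_lst → Spec_find_max_friends names_lst friends_lst (find_max_friends names_lst friends_lst)

-- ===== LEMMAS AND PROOFS =====

-- running maximum of a list (none on []), the value Source B's best_count holds
def fmfRunMax : List Int → Option Int
  | [] => none
  | x :: t => some (t.foldl max x)

theorem fmfRunMax_append (l : List Int) (c : Int) :
    fmfRunMax (l ++ [c]) = some (match fmfRunMax l with | none => c | some m => max m c) := by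
  cases l with
  | nil => rfl
  | cons x t => simp [fmfRunMax, List.foldl_append]

theorem fmfRunMax_isMax (l : List Int) (m : Int) (h : fmfRunMax l = some m) :
    ∀ y ∈ l, y ≤ m := by
  cases l with
  | nil => simp
  | cons x t =>
    simp only [fmfRunMax, Option.some.injEq] at h
    subst h
    intro y hy
    rcases List.mem_cons.mp hy with rfl | hy
    · exact (PySem.List.le_foldl_max t y).1
    · exact (PySem.List.le_foldl_max t x).2 y hy

-- the loop invariant: after processing indices < n (n ≥ 1) Source B's state is (max of first n counts,
-- names at indices among the first n achieving that max, in index order)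
theorem fmfLoopInv (names_lst : List String) (friends_lst : List (List String))
    (cts : List Int) (hc : cts = friends_lst.map (fun f => (f.length : Int)))
    (n : Nat) (h1 : 1 ≤ n) (hn : n ≤ friends_lst.length) :
    (PySem.List.pyRange 1 (n : Int) 1).foldl (fmfAltStep names_lst friends_lst)
        (((PySem.List.pyGetD friends_lst 0 []).length : Int), [PySem.List.pyGetD names_lst 0 ""]) =
      ((fmfRunMax (cts.take n)).getD 0,
       ((PySem.List.enumerate (cts.take n)).filter
          (fun p => decide (p.2 = (fmfRunMax (cts.take n)).getD 0))).map
         (fun p => PySem.List.pyGetD names_lst p.1 "")) := by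
  have hcl : cts.length = friends_lst.length := by simp [hc]
  have hget : ∀ k : Nat, (hk : k < friends_lst.length) →
      ((PySem.List.pyGetD friends_lst (k : Int) []).length : Int) = cts[k]'(by omega) := by
    intro k hk
    simp [PySem.List.pyGetD_natCast, List.getD_eq_getElem?_getD, List.getElem?_eq_getElem hk, hc]
  induction n, h1 using Nat.le_induction with
  | base =>
    have h0 : (0 : Nat) < friends_lst.length := by omega
    have hc0 := hget 0 h0
    have htake : cts.take 1 = [cts[0]'(by omega)] := by
      rw [List.take_one]
      rw [List.head?_eq_getElem?, List.getElem?_eq_getElem (by omega)]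
      rfl
    rw [PySem.List.pyRange_one_eq_nil (by norm_num)]
    simp only [List.foldl_nil, htake, fmfRunMax, List.foldl_nil, Option.getD_some]
    simp [PySem.List.enumerate]
    exact_mod_cast hc0
  | succ n h1 ih =>
    have hn' : n ≤ friends_lst.length := by omega
    have hnl : n < friends_lst.length := by omega
    have hrange : PySem.List.pyRange 1 ((n + 1 : Nat) : Int) 1
        = PySem.List.pyRange 1 (n : Int) 1 ++ [(n : Int)] := by
      push_cast
      exact PySem.List.pyRange_one_succ_right (by exact_mod_cast h1)
    have hcn := hget n hnl
    have htake : cts.take (n + 1) = cts.take n ++ [cts[n]'(by omega)] := by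
      rw [List.take_add_one, List.getElem?_eq_getElem (by omega)]; rfl
    have hlen : (cts.take n).length = n := by simp; omega
    rw [hrange, List.foldl_append, ih hn' hget]
    rw [htake, fmfRunMax_append]
    rw [PySem.List.enumerate_append, List.filter_append]
    simp only [List.foldl_cons, List.foldl_nil]
    set c := cts[n]'(by omega) with hcdef
    cases hm : fmfRunMax (cts.take n) with
    | none =>
      exfalso
      have h0 : cts.take n = [] := by
        cases h : cts.take n with
        | nil => rfl
        | cons a t => rw [h] at hm; simp [fmfRunMax] at hm
      rw [h0] at hlen; simp at hlen; omega
    | some m =>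
      have hmax := fmfRunMax_isMax _ _ hm
      simp only [fmfAltStep, hcn, Option.getD_some]
      by_cases hgt : c > m
      · -- strict new record
        have hcm : max m c = c := by omega
        have hfilt : (PySem.List.enumerate (cts.take n)).filter (fun p => decide (p.2 = c)) = [] := by
          apply List.filter_eq_nil_iff.mpr
          intro p hp
          rcases (PySem.List.mem_enumerate_iff _ _ _).mp hp with ⟨k, hk, rfl⟩
          have hle : (cts.take n)[k] ≤ m := hmax _ (List.getElem_mem hk)
          intro hpe
          simp only [decide_eq_true_eq] at hpe
          rw [hpe] at hle
          omega
        simp [hgt, hcm, hfilt, hlen, PySem.List.enumerate]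
      · by_cases heq : c = m
        · have hcm : max m c = m := by omega
          simp [heq, hlen, PySem.List.enumerate]
          rfl
        · have hlt : c < m := by omega
          have hcm : max m c = m := by omega
          simp [hgt, heq, hcm, hlen, PySem.List.enumerate]
          rfl

theorem fmfRunMax_eq_max? (l : List Int) :
    fmfRunMax l = PySem.List.max? l (fun x => x) := by
  cases l with
  | nil => rfl
  | cons x t => rw [PySem.List.max?_id_cons]; rfl

theorem fmf_ports_eq (names_lst : List String) (friends_lst : List (List String))
    (hne : friends_lst ≠ []) :
    find_max_friends names_lst friends_lst = find_max_friends_alt names_lst friends_lst := by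
  unfold find_max_friends find_max_friends_alt
  dsimp only
  have hcts : friends_lst.foldl (fun acc i => acc ++ [(i.length : Int)]) []
      = friends_lst.map (fun f => (f.length : Int)) := by
    simpa using PySem.List.foldl_append_singleton_eq_map (fun f : List String => (f.length : Int)) friends_lst []
  set cts := friends_lst.map (fun f => (f.length : Int)) with hcdef
  have hlen : cts.length = friends_lst.length := by simp [hcdef]
  have h1 : 1 ≤ friends_lst.length := by
    cases friends_lst with
    | nil => exact absurd rfl hne
    | cons a t => simp
  have hloop := fmfLoopInv names_lst friends_lst cts hcdef friends_lst.length h1 (le_refl _)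
  rw [List.take_of_length_le (le_of_eq hlen)] at hloop
  rw [hcts, hloop, ← fmfRunMax_eq_max?]
  have hfold : ∀ (v : Int),
        (PySem.List.enumerate cts).foldl (fun acc i =>
          if i.2 = v then acc ++ [PySem.List.pyGetD names_lst i.1 ""] else acc) []
        = ((PySem.List.enumerate cts).filter (fun p => decide (p.2 = v))).map
            (fun p => PySem.List.pyGetD names_lst p.1 "") := by
    intro v
    simpa using PySem.List.foldl_append_if (fun p : Int × Int => decide (p.2 = v))
      (fun p => PySem.List.pyGetD names_lst p.1 "") (PySem.List.enumerate cts) []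
  cases hm : fmfRunMax cts with
    | none =>
      exfalso
      have hnil : cts = [] := by
        cases hcl : cts with
        | nil => rfl
        | cons a t => rw [hcl] at hm; simp [fmfRunMax] at hm
      rw [hnil] at hlen
      simp at hlen
      omega
    | some m =>
      simp only [Option.getD_some]
      exact congrArg (fun l => (PySem.List.sorted l (fun x => x) false, m)) (hfold m)

-- ===== VERDICT (by name: the statement is the Claim_ definition above) =====
theorem find_max_friends_spec : Claim_equal_find_max_friends := by
  intro names_lst friends_lst _ hpre
  unfold Spec_find_max_friends
  exact fmf_ports_eq names_lst friends_lst hpre.1
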